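-- pv_equiv track=rewrite | github.com/phorkyas-tg/advent-of-code | aoc2021/day03.py | getBitCount
-- ===== SOURCE A (Python) =====
-- def getBitCount(lines, i):
--     zeros = 0
--     ones = 0
--
--     for line in lines:
--         if line[i] == "0":
--             zeros += 1
--         else:
--             ones += 1
--     return zeros, ones
-- ===== SOURCE B (Python) =====
-- def getBitCount(lines, i):
--     # Divide and conquer: recursively split the index range in half and add pair counts.
--     def go(lo, hi):
--         if hi - lo == 0:
--             return (0, 0)
--         if hi - lo == 1:
--             if lines[lo][i] == "0":
--                 return (1, 0)
--             return (0, 1)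
--         mid = (lo + hi) // 2
--         z1, o1 = go(lo, mid)
--         z2, o2 = go(mid, hi)
--         return (z1 + z2, o1 + o2)
--     return go(0, len(lines))
-- ===== Notes on version B (the rewrite author's own statement) =====
-- stated objective: alternative
-- what changed: B replaces A's sequential loop with two running counters by a recursive divide-and-conquer over index ranges: split the range in half, count each half recursively, and add the component pairs.
import Mathlib
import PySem

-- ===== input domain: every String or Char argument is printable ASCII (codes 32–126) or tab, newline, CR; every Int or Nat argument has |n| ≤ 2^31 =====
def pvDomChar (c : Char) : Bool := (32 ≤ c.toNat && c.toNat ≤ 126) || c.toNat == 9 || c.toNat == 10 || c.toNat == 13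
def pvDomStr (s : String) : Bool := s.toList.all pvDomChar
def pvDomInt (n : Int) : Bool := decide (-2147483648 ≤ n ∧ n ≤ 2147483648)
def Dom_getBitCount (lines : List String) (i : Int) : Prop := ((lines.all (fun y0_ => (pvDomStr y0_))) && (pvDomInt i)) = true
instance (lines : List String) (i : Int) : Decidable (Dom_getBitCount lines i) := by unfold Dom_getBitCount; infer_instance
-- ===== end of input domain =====

-- B replaces A's sequential two-counter loop by a recursive halving of the index range (alternative decomposition, same cost).

-- ===== PORT A =====
-- two parallel counters updated by an if/else over each line
def getBitCount (lines : List String) (i : Int) : Int × Int :=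
  lines.foldl (fun st line =>
    match PySem.Str.pyGet? line i with
    | some c => if c = '0' then (st.1 + 1, st.2) else (st.1, st.2 + 1)
    | none => st)   -- Python raises IndexError here; excluded by Pre_
  (0, 0)

-- ===== PORT B =====
-- divide and conquer: go lo hi splits [lo, hi) at the midpoint and adds the pair counts
-- (the extra 'fuel' argument, hi - lo at the top call, only makes the recursion structural; it never changes the result)
def gbcGo (lines : List String) (i : Int) : Nat → Nat → Nat → Int × Int
  | 0, _, _ => (0, 0)                -- fuel exhausted: only reachable with hi - lo = 0
  | fuel + 1, lo, hi =>
    if hi - lo = 0 then (0, 0)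
    else if hi - lo = 1 then
      match PySem.List.pyGet? lines (lo : Int) with
      | some line =>
        match PySem.Str.pyGet? line i with
        | some c => if c = '0' then (1, 0) else (0, 1)
        | none => (0, 0)   -- Python raises IndexError here; excluded by Pre_
      | none => (0, 0)     -- unreachable for 0 ≤ lo < hi ≤ len(lines)
    else
      let mid := (lo + hi) / 2
      let p1 := gbcGo lines i fuel lo mid
      let p2 := gbcGo lines i fuel mid hi
      (p1.1 + p2.1, p1.2 + p2.2)

def getBitCount_alt (lines : List String) (i : Int) : Int × Int :=
  gbcGo lines i lines.length 0 lines.length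

-- ===== PRECONDITION & SPEC =====
-- Pre_ excludes exactly the inputs where A raises IndexError (index i out of range for some line)
def Pre_getBitCount (lines : List String) (i : Int) : Prop :=
  ∀ s ∈ lines, PySem.Raise.InRange s.toList.length i
instance (lines : List String) (i : Int) : Decidable (Pre_getBitCount lines i) := by
  unfold Pre_getBitCount; infer_instance
def pvWitness_getBitCount : List String × Int := (["101", "011", "1x0"], 1)

def Spec_getBitCount (lines : List String) (i : Int) (out : Int × Int) : Prop := out = getBitCount_alt lines i
instance (lines : List String) (i : Int) (out : Int × Int) : Decidable (Spec_getBitCount lines i out) := by unfold Spec_getBitCount; infer_instance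

-- ===== CLAIM (what is proved, stated in full; the proofs are below) =====
def Claim_equal_getBitCount : Prop := ∀ (lines : List String) (i : Int), Dom_getBitCount lines i → Pre_getBitCount lines i → Spec_getBitCount lines i (getBitCount lines i)

-- ===== LEMMAS AND PROOFS =====

-- the predicate both characterisations count
def gbcP (i : Int) (line : String) : Bool := PySem.Str.pyGet? line i == some '0'

-- A's fold equals (zeros, ones) expressed through countP and length
theorem getBitCount_foldl (lines : List String) (i : Int)
    (h : ∀ s ∈ lines, PySem.Raise.InRange s.toList.length i) (z o : Int) :
    lines.foldl (fun st line =>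
      match PySem.Str.pyGet? line i with
      | some c => if c = '0' then (st.1 + 1, st.2) else (st.1, st.2 + 1)
      | none => st) (z, o)
    = (z + (lines.countP (gbcP i) : Nat),
       o + ((lines.length : Int) - (lines.countP (gbcP i) : Nat))) := by
  induction lines generalizing z o with
  | nil => simp
  | cons s rest ih =>
    have hin : PySem.Raise.InRange s.toList.length i := h s (by simp)
    obtain ⟨c, hc⟩ : ∃ c, PySem.Str.pyGet? s i = some c := by
      cases hg : PySem.Str.pyGet? s i with
      | none =>
        exfalso
        have := (PySem.List.pyGet?_eq_none_iff (xs := s.toList) (i := i)).1 (by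
          simpa [PySem.Str.pyGet?] using hg)
        exact this hin
      | some c => exact ⟨c, rfl⟩
    have hrest : ∀ t ∈ rest, PySem.Raise.InRange t.toList.length i :=
      fun t ht => h t (by simp [ht])
    by_cases h0 : c = '0'
    · simp only [List.foldl_cons, hc, List.countP_cons, List.length_cons, gbcP, h0,
        beq_self_eq_true, if_true]
      rw [ih hrest]
      simp only [Prod.mk.injEq]
      constructor <;> push_cast <;> omega
    · have hb : (some c == some ('0' : Char)) = false := by simp [h0]
      simp only [List.foldl_cons, hc, List.countP_cons, List.length_cons, gbcP, hb,
        if_neg h0, Bool.false_eq_true, if_false]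
      rw [ih hrest]
      simp only [Prod.mk.injEq]
      constructor <;> push_cast <;> omega

-- B's recursion on [lo, hi) counts over the slice lines[lo:hi]
theorem gbcGo_eq (lines : List String) (i : Int)
    (h : ∀ s ∈ lines, PySem.Raise.InRange s.toList.length i) :
    ∀ n fuel lo hi, hi - lo = n → n ≤ fuel → lo ≤ hi → hi ≤ lines.length →
      gbcGo lines i fuel lo hi
        = (((((lines.drop lo).take (hi - lo)).countP (gbcP i) : Nat) : Int),
           ((hi - lo : Nat) : Int) - (((lines.drop lo).take (hi - lo)).countP (gbcP i) : Nat)) := by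
  intro n
  induction n using Nat.strong_induction_on with
  | _ n ih =>
    intro fuel lo hi hn hf hle hlen
    rcases Nat.eq_zero_or_pos n with h0 | hpos
    · subst h0
      have : hi = lo := by omega
      subst this
      cases fuel <;> simp [gbcGo, Nat.sub_self]
    rcases Nat.lt_or_ge n 2 with h1 | h2
    · -- n = 1: hi = lo + 1
      have hhi : hi = lo + 1 := by omega
      subst hhi
      have hlt : lo < lines.length := by omega
      obtain ⟨f, rfl⟩ : ∃ f, fuel = f + 1 := ⟨fuel - 1, by omega⟩
      rw [gbcGo]
      simp only [Nat.add_sub_cancel_left]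
      have hget : PySem.List.pyGet? lines (lo : Int) = some lines[lo] := by
        simp [hlt]
      have hslice : (lines.drop lo).take 1 = [lines[lo]] := by
        rw [List.take_one, List.head?_drop]
        simp [hlt]
      have hin : PySem.Raise.InRange (lines[lo]).toList.length i :=
        h _ (List.getElem_mem hlt)
      obtain ⟨c, hc⟩ : ∃ c, PySem.Str.pyGet? lines[lo] i = some c := by
        cases hg : PySem.Str.pyGet? lines[lo] i with
        | none =>
          exfalso
          have := (PySem.List.pyGet?_eq_none_iff (xs := (lines[lo]).toList) (i := i)).1 (by
            simpa [PySem.Str.pyGet?] using hg)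
          exact this hin
        | some c => exact ⟨c, rfl⟩
      rw [hget]
      simp only [hc, hslice, List.countP_cons, List.countP_nil, gbcP, hc]
      by_cases h0 : c = '0' <;> simp [h0]
    · -- n ≥ 2: split at mid
      have hn2 : 2 ≤ hi - lo := by omega
      obtain ⟨f, rfl⟩ : ∃ f, fuel = f + 1 := ⟨fuel - 1, by omega⟩
      rw [gbcGo]
      have hne0 : ¬ (hi - lo = 0) := by omega
      have hne1 : ¬ (hi - lo = 1) := by omega
      simp only [hne0, hne1, if_false]
      set mid := (lo + hi) / 2 with hmid
      have hbounds : lo < mid ∧ mid < hi := by constructor <;> omega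
      clear_value mid
      clear hmid
      rw [ih (mid - lo) (by omega) f lo mid rfl (by omega) (by omega) (by omega),
          ih (hi - mid) (by omega) f mid hi rfl (by omega) (by omega) (by omega)]
      have hsplit : (lines.drop lo).take (hi - lo)
          = (lines.drop lo).take (mid - lo) ++ (lines.drop mid).take (hi - mid) := by
        have h1 : (mid - lo) + (hi - mid) = hi - lo := by omega
        rw [← h1, List.take_add, List.drop_drop]
        first
        | rw [show mid - lo + lo = mid by omega]
        | rw [show lo + (mid - lo) = mid by omega]
      rw [hsplit, List.countP_append]
      simp only [Prod.mk.injEq]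
      constructor <;> push_cast <;> omega

-- ===== VERDICT (by name: the statement is the Claim_ definition above) =====
theorem getBitCount_spec : Claim_equal_getBitCount := by
  intro lines i _ hpre
  unfold Spec_getBitCount getBitCount getBitCount_alt
  rw [gbcGo_eq lines i hpre lines.length lines.length 0 lines.length rfl le_rfl (by omega) le_rfl]
  simpa using getBitCount_foldl lines i hpre 0 0
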